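-- pv_equiv track=rewrite | github.com/jaiden06/PasswordVerification | websitePassword.py | containsSpecialCharacters
-- ===== SOURCE A (Python) =====
-- def containsDigit(passwordList):
--     """Accepts a list of passwords and returns a sorted list of passwords where those passwords containing digits are accepted and the rest are rejected."""
--     AcceptedList = []
--     RejectedList = []
--     containsDigit = False
--     for password in passwordList:
--         passwordContainsDigit = False
--         for individualCharacter in password:
--             if individualCharacter.isdigit():
--                 passwordContainsDigit = True
--         if passwordContainsDigit: # vs. if containsDigit == True:      containsDigit (True / False)
--             AcceptedList.append(password)
--         else: # elif containsDigit == False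
--             RejectedList.append(password)
--     AcceptedRejectedList = [RejectedList, AcceptedList]
--     return AcceptedRejectedList
--
-- def passLength(passwordList):
--     x = containsDigit(passwordList)
--     AcceptedList = x[1]
--     RejectedList = x[0]
--     for position, password in enumerate(AcceptedList):
--         if len(password) <= 5 or len(password) >= 13:
--             AcceptedList.pop(position)
--             AcceptedList.insert(position, None)
--             RejectedList.append(password)
--     AcceptedRejectedList = [RejectedList, AcceptedList]
--     return AcceptedRejectedList
--
-- def containsSpecialCharacters(passwordList): #creates the new function(problem area)
--     x = passLength(passwordList)
--     AcceptedList = x[1]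
--     RejectedList = x[0]
--     for password in AcceptedList:
--         if password == None:
--             continue
--         SymbolInPass = False
--         if password.find("#") + password.find("$") + password.find("@") != -3:
--             SymbolInPass = True
--         if SymbolInPass == False:
--             x = AcceptedList.index(password)
--             AcceptedList.pop(x)
--             AcceptedList.insert(x, None)
--             RejectedList.append(password)
--     AcceptedRejectedList = [RejectedList, AcceptedList]
--     return AcceptedRejectedList
-- ===== SOURCE B (Python) =====
-- def containsSpecialCharacters(passwordList):
--     """Single-pass classification: no mutation, no .index scans."""
--     def hasDigit(p): return any(c.isdigit() for c in p)
--     def lenOk(p): return 6 <= len(p) <= 12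
--     def hasSym(p): return any(s in p for s in ("#", "$", "@"))
--     accepted = [p if lenOk(p) and hasSym(p) else None
--                 for p in passwordList if hasDigit(p)]
--     rejected = ([p for p in passwordList if not hasDigit(p)]
--                 + [p for p in passwordList if hasDigit(p) and not lenOk(p)]
--                 + [p for p in passwordList if hasDigit(p) and lenOk(p) and not hasSym(p)])
--     return [rejected, accepted]
-- ===== Notes on version B (the rewrite author's own statement) =====
-- stated objective: simpler
-- what changed: Replaces the three mutating pipeline stages (partition, then in-place pop/insert of None with enumerate, then .index scans over the mutating accepted list) with a direct one-shot classification: each password is tested for digit/length/symbol once and the accepted and three rejected groups are built by plain comprehensions.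
import Mathlib
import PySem

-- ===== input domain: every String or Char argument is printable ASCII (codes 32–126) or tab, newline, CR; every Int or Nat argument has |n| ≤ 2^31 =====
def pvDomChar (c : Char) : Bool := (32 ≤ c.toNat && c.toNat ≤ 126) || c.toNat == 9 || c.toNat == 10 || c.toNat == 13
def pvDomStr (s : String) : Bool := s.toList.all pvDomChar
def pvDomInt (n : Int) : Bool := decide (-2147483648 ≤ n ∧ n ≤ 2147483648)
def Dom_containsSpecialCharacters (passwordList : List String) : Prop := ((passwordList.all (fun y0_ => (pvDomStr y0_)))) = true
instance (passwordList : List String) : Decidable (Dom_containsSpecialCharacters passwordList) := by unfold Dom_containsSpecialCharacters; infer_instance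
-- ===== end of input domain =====

-- B replaces A's three mutating stages (partition, in-place None replacement, .index scans)
-- with one direct classification into the accepted list and three rejected groups (simpler).

-- ===== PORT A =====
-- helper containsDigit: returns (RejectedList, AcceptedList)
def pvContainsDigitA (passwordList : List String) : List String × List String :=
  passwordList.foldl
    (fun (st : List String × List String) password =>
      -- inner loop: flag stays true once a digit character is seen
      let passwordContainsDigit :=
        password.toList.foldl (fun f c => if PySem.Chars.isdigit c then true else f) false
      if passwordContainsDigit then (st.1, st.2 ++ [password]) else (st.1 ++ [password], st.2))
    ([], [])

-- helper passLength: the enumerate loop pops/inserts at the current position, i.e. replaces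
-- the current slot by None and appends the password to RejectedList
def pvPassLengthA (passwordList : List String) : List String × List (Option String) :=
  let x := pvContainsDigitA passwordList
  x.2.foldl
    (fun (st : List String × List (Option String)) password =>
      if PySem.Str.len password ≤ 5 ∨ 13 ≤ PySem.Str.len password then
        (st.1 ++ [password], st.2 ++ [none])
      else (st.1, st.2 ++ [some password]))
    (x.1, [])

-- the find("#") + find("$") + find("@") != -3 test of A
def pvFindSumA (password : String) : Int :=
  PySem.Str.find password "#" + PySem.Str.find password "$" + PySem.Str.find password "@"

-- the main loop of A: iterates by position over the mutating AcceptedList (length never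
-- changes: pop is immediately followed by insert); on a symbol-less password it locates the
-- FIRST index holding that password (AcceptedList.index), sets it to None and appends to rej
def pvCsLoopA : Nat → Nat → List (Option String) → List String →
    List (Option String) × List String
  | 0, _, lst, rej => (lst, rej)
  | fuel + 1, i, lst, rej =>
    match lst[i]? with
    | some (some password) =>
      if pvFindSumA password ≠ -3 then
        pvCsLoopA fuel (i + 1) lst rej
      else
        let x := lst.idxOf (some password)
        pvCsLoopA fuel (i + 1) (lst.set x none) (rej ++ [password])
    | _ => pvCsLoopA fuel (i + 1) lst rej

def containsSpecialCharacters (passwordList : List String) : List (List (Option String)) :=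
  let x := pvPassLengthA passwordList
  let r := pvCsLoopA x.2.length 0 x.2 x.1
  [r.2.map some, r.1]

-- ===== PORT B =====
def pvHasDigitB (p : String) : Bool := p.toList.any PySem.Chars.isdigit
def pvLenOkB (p : String) : Bool := decide (6 ≤ PySem.Str.len p ∧ PySem.Str.len p ≤ 12)
def pvHasSymB (p : String) : Bool := ["#", "$", "@"].any (fun s => PySem.Str.isIn s p)

def containsSpecialCharacters_alt (passwordList : List String) : List (List (Option String)) :=
  let accepted := (passwordList.filter pvHasDigitB).map
      (fun p => if pvLenOkB p && pvHasSymB p then some p else none)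
  let rejected :=
    passwordList.filter (fun p => !pvHasDigitB p)
      ++ passwordList.filter (fun p => pvHasDigitB p && !pvLenOkB p)
      ++ passwordList.filter (fun p => pvHasDigitB p && pvLenOkB p && !pvHasSymB p)
  [rejected.map some, accepted]

-- ===== PRECONDITION & SPEC =====
def Spec_containsSpecialCharacters (passwordList : List String) (out : List (List (Option String))) : Prop := out = containsSpecialCharacters_alt passwordList
instance (passwordList : List String) (out : List (List (Option String))) : Decidable (Spec_containsSpecialCharacters passwordList out) := by unfold Spec_containsSpecialCharacters; infer_instance

-- ===== CLAIM (what is proved, stated in full; the proofs are below) =====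
def Claim_equal_containsSpecialCharacters : Prop := ∀ (passwordList : List String), Dom_containsSpecialCharacters passwordList → Spec_containsSpecialCharacters passwordList (containsSpecialCharacters passwordList)

-- ===== LEMMAS AND PROOFS =====

-- inner digit loop of A computes List.any isdigit
theorem pvDigitFold (cs : List Char) (f : Bool) :
    cs.foldl (fun f c => if PySem.Chars.isdigit c then true else f) f
      = (f || cs.any PySem.Chars.isdigit) := by
  induction cs generalizing f with
  | nil => simp
  | cons c cs ih =>
    simp only [List.foldl_cons, List.any_cons, ih]
    by_cases h : PySem.Chars.isdigit c <;> simp [h]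

theorem pvContainsDigitA_eq (passwordList : List String) :
    pvContainsDigitA passwordList
      = (passwordList.filter (fun p => !pvHasDigitB p), passwordList.filter pvHasDigitB) := by
  unfold pvContainsDigitA
  suffices h : ∀ (l : List String) (r a : List String),
      l.foldl (fun (st : List String × List String) password =>
        let flag := password.toList.foldl (fun f c => if PySem.Chars.isdigit c then true else f) false
        if flag then (st.1, st.2 ++ [password]) else (st.1 ++ [password], st.2)) (r, a)
      = (r ++ l.filter (fun p => !pvHasDigitB p), a ++ l.filter pvHasDigitB) by
    simpa using h passwordList [] []
  intro l
  induction l with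
  | nil => intro r a; simp
  | cons p l ih =>
    intro r a
    have hflag : p.toList.foldl (fun f c => if PySem.Chars.isdigit c then true else f) false
        = pvHasDigitB p := by
      rw [pvDigitFold]; simp [pvHasDigitB]
    simp only [List.foldl_cons, hflag]
    by_cases h : pvHasDigitB p = true
    · rw [if_pos h, ih]
      simp [h]
    · rw [if_neg h, ih]
      simp [h]

theorem pvPassLengthA_eq (passwordList : List String) :
    pvPassLengthA passwordList
      = (passwordList.filter (fun p => !pvHasDigitB p)
            ++ (passwordList.filter pvHasDigitB).filter (fun p => !pvLenOkB p),
         (passwordList.filter pvHasDigitB).map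
            (fun p => if pvLenOkB p then some p else none)) := by
  unfold pvPassLengthA
  rw [pvContainsDigitA_eq]
  suffices h : ∀ (l : List String) (r : List String) (a : List (Option String)),
      l.foldl (fun (st : List String × List (Option String)) password =>
        if PySem.Str.len password ≤ 5 ∨ 13 ≤ PySem.Str.len password then
          (st.1 ++ [password], st.2 ++ [none])
        else (st.1, st.2 ++ [some password])) (r, a)
      = (r ++ l.filter (fun p => !pvLenOkB p),
         a ++ l.map (fun p => if pvLenOkB p then some p else none)) by
    simpa using h (passwordList.filter pvHasDigitB) (passwordList.filter (fun p => !pvHasDigitB p)) []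
  intro l
  induction l with
  | nil => intro r a; simp
  | cons p l ih =>
    intro r a
    simp only [List.foldl_cons]
    by_cases h : pvLenOkB p = true
    · have h' : 6 ≤ PySem.Str.len p ∧ PySem.Str.len p ≤ 12 := by
        unfold pvLenOkB at h; exact of_decide_eq_true h
      have hcond : ¬ (PySem.Str.len p ≤ 5 ∨ 13 ≤ PySem.Str.len p) := by omega
      rw [if_neg hcond, ih]
      simp [h]
    · have h' : ¬ (6 ≤ PySem.Str.len p ∧ PySem.Str.len p ≤ 12) := by
        unfold pvLenOkB at h; simpa using h
      have hcond : PySem.Str.len p ≤ 5 ∨ 13 ≤ PySem.Str.len p := by omega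
      rw [if_pos hcond, ih]
      simp [h]

-- A's find-sum test equals B's symbol membership test
theorem pvFindSumA_iff (p : String) : (pvFindSumA p ≠ -3) ↔ pvHasSymB p = true := by
  unfold pvFindSumA pvHasSymB
  have h1 := PySem.Chars.neg_one_le_find p.toList "#".toList
  have h2 := PySem.Chars.neg_one_le_find p.toList "$".toList
  have h3 := PySem.Chars.neg_one_le_find p.toList "@".toList
  simp only [List.any_cons, List.any_nil, Bool.or_false, Bool.or_eq_true,
    PySem.Str.isIn_iff_infix, PySem.Str.find_eq, ← PySem.Chars.find_ne_neg_one_iff]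
  constructor
  · intro h
    by_contra hc
    push Not at hc
    omega
  · intro h hc
    rcases h with h | h | h <;> omega

-- first index of x is i when x sits at i and nowhere earlier
theorem pvIdxOf_eq (lst : List (Option String)) (i : Nat) (x : Option String)
    (hx : lst[i]? = some x) (hbefore : ∀ j < i, lst[j]? ≠ some x) :
    lst.idxOf x = i := by
  induction lst generalizing i with
  | nil => simp at hx
  | cons a lst ih =>
    cases i with
    | zero =>
      simp at hx
      subst hx
      simp
    | succ i =>
      have ha : a ≠ x := by
        intro h; exact hbefore 0 (Nat.succ_pos _) (by simp [h])
      simp only [List.getElem?_cons_succ] at hx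
      have hrec : lst.idxOf x = i := ih i hx (fun j hj => by
        have := hbefore (j + 1) (by omega)
        simpa using this)
      simp [ha, hrec]

-- value of A's main loop on a list whose processed prefix only holds symbol-bearing entries
theorem pvCsLoopA_eq (n : Nat) : ∀ (i : Nat) (lst : List (Option String)) (rej : List String),
    n + i = lst.length →
    (∀ j < i, ∀ q : String, lst[j]? = some (some q) → pvHasSymB q = true) →
    pvCsLoopA n i lst rej
      = (lst.take i ++ (lst.drop i).map (fun o => o.bind (fun p => if pvHasSymB p then some p else none)),
         rej ++ (lst.drop i).filterMap (fun o => o.bind (fun p => if pvHasSymB p then none else some p))) := by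
  induction n with
  | zero =>
    intro i lst rej hn _
    have : i = lst.length := by omega
    subst this
    simp [pvCsLoopA]
  | succ n ih =>
    intro i lst rej hn hinv
    have hi : i < lst.length := by omega
    have hdrop : lst[i] :: lst.drop (i + 1) = lst.drop i := List.getElem_cons_drop hi
    have hget : lst[i]? = some lst[i] := List.getElem?_eq_getElem hi
    rw [pvCsLoopA, hget]
    cases hel : lst[i] with
    | none =>
      rw [ih (i + 1) lst rej (by omega)
        (fun j hj q hq => by
          rcases Nat.lt_or_ge j i with h | h
          · exact hinv j h q hq
          · have : j = i := by omega
            subst this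
            rw [hget, hel] at hq; simp at hq)]
      rw [← hdrop, hel]
      simp [List.take_add_one, hget, hel, List.append_assoc]
    | some password =>
      simp only []
      by_cases hsym : pvFindSumA password ≠ -3
      · have hs : pvHasSymB password = true := (pvFindSumA_iff password).mp hsym
        rw [if_pos hsym]
        rw [ih (i + 1) lst rej (by omega)
          (fun j hj q hq => by
            rcases Nat.lt_or_ge j i with h | h
            · exact hinv j h q hq
            · have : j = i := by omega
              subst this
              rw [hget, hel] at hq
              simp at hq; subst hq; exact hs)]
        rw [← hdrop, hel]
        simp [List.take_add_one, hget, hel, hs, List.append_assoc]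
      · have hs : pvHasSymB password = false := by
          by_contra h
          exact hsym ((pvFindSumA_iff password).mpr (by simpa using h))
        have hidx : lst.idxOf (some password) = i := by
          apply pvIdxOf_eq lst i (some password) (by rw [hget, hel])
          intro j hj hq
          have := hinv j hj password hq
          rw [hs] at this; exact absurd this (by simp)
        rw [if_neg hsym, hidx]
        rw [ih (i + 1) (lst.set i none) (rej ++ [password]) (by simp; omega)
          (fun j hj q hq => by
            rcases Nat.lt_or_ge j i with h | h
            · rw [List.getElem?_set_ne (by omega)] at hq
              exact hinv j h q hq
            · have : j = i := by omega
              subst this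
              rw [List.getElem?_set_self hi] at hq
              simp at hq)]
        have htake : (lst.set i none).take (i + 1) = lst.take i ++ [none] := by
          rw [List.take_add_one, List.take_set_of_le (le_refl i), List.getElem?_set_self hi]
          simp
        have hdrop2 : (lst.set i none).drop (i + 1) = lst.drop (i + 1) := by
          apply List.ext_getElem?
          intro j
          rw [List.getElem?_drop, List.getElem?_drop, List.getElem?_set_ne (by omega)]
        rw [htake, hdrop2, ← hdrop, hel]
        simp [hs, List.append_assoc]

theorem containsSpecialCharacters_eq_alt (passwordList : List String) :
    containsSpecialCharacters passwordList = containsSpecialCharacters_alt passwordList := by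
  simp only [containsSpecialCharacters, containsSpecialCharacters_alt]
  rw [pvPassLengthA_eq]
  rw [pvCsLoopA_eq _ 0 _ _ (by simp) (by intro j hj; omega)]
  simp only [List.take_zero, List.drop_zero, List.nil_append]
  have hg2 : (passwordList.filter pvHasDigitB).filter (fun p => !pvLenOkB p)
      = passwordList.filter (fun p => pvHasDigitB p && !pvLenOkB p) := by
    rw [List.filter_filter]
    exact List.filter_congr (fun p _ => by rw [Bool.and_comm])
  have hg3 : ((passwordList.filter pvHasDigitB).map
        (fun p => if pvLenOkB p then some p else none)).filterMap
          (fun o => o.bind (fun p => if pvHasSymB p then none else some p))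
      = passwordList.filter (fun p => pvHasDigitB p && pvLenOkB p && !pvHasSymB p) := by
    rw [List.filterMap_map, List.filterMap_filter, ← List.filterMap_eq_filter]
    congr 1
    funext p
    by_cases hd : pvHasDigitB p <;> by_cases hl : pvLenOkB p <;>
      by_cases hs : pvHasSymB p <;>
      simp [hd, hl, hs, Function.comp, Option.guard]
  have hacc : ((passwordList.filter pvHasDigitB).map
        (fun p => if pvLenOkB p then some p else none)).map
          (fun o => o.bind (fun p => if pvHasSymB p then some p else none))
      = (passwordList.filter pvHasDigitB).map
          (fun p => if pvLenOkB p && pvHasSymB p then some p else none) := by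
    rw [List.map_map]
    apply List.map_congr_left
    intro p _
    by_cases hl : pvLenOkB p <;> by_cases hs : pvHasSymB p <;>
      simp [hl, hs, Function.comp]
  rw [hg2, hg3, hacc, List.append_assoc]

-- ===== VERDICT (by name: the statement is the Claim_ definition above) =====
theorem containsSpecialCharacters_spec : Claim_equal_containsSpecialCharacters := by
  intro passwordList _
  unfold Spec_containsSpecialCharacters
  exact containsSpecialCharacters_eq_alt passwordList
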